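-- pv_equiv track=rewrite | github.com/leonletto/PII_detector | iob_tagger.py | pii_locator
-- ===== SOURCE A (Python) =====
-- def pii_locator(sl,l):
--     sll=len(sl)
--     for ind in (i for i,e in enumerate(l) if e==sl[0]):
--         if l[ind:ind+sll] == sl:
--             return ind , ind+sll
--
--         elif sl[-1] == '.' and l[ind+sll-1] != '.':
--              sl_t = sl[:-1]
--              sl_t[-1] = sl_t[-1] + '.'
--              if l[ind:ind+sll-1] == sl_t:
--                  return ind , ind+sll-1
-- ===== SOURCE B (Python) =====
-- def pii_locator(sl, l):
--     if not sl:
--         return None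
--     m, n = len(sl), len(l)
--
--     def first_at(pat):
--         k = len(pat)
--         return next((i for i in range(n - k + 1) if l[i:i + k] == pat), None)
--
--     i1 = first_at(sl)
--     i2 = None
--     if m >= 3 and sl[-1] == '.':
--         pat = sl[:-2] + [sl[-2] + '.']
--         i2 = next((i for i in range(n - m + 2)
--                    if l[i:i + m - 1] == pat and (i + m - 1 >= n or l[i + m - 1] != '.')),
--                   None)
--     if i1 is not None and (i2 is None or i1 <= i2):
--         return i1, i1 + m
--     if i2 is not None:
--         return i2, i2 + m - 1
--     return None
-- ===== Notes on version B (the rewrite author's own statement) =====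
-- stated objective: alternative
-- what changed: A interleaves both pattern checks inside one scan over the positions of sl[0], returning from whichever branch fires first; B precomputes the dot-merged pattern once, runs two independent first-occurrence searches (exact pattern and dot pattern with its not-followed-by-dot condition) and combines the two indices, taking the earlier one.
import Mathlib
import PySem

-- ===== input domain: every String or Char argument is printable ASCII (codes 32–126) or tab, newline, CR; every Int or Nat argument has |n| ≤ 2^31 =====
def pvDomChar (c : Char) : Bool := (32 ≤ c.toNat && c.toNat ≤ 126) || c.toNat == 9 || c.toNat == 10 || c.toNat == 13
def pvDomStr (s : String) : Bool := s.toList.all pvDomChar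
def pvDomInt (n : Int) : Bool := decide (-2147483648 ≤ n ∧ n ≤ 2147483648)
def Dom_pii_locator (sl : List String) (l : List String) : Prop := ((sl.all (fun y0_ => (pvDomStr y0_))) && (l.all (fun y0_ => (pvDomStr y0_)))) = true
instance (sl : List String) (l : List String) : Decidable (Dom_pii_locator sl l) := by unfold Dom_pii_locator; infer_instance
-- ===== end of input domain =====

-- B restructures A's single interleaved candidate scan into two independent
-- first-occurrence searches (exact pattern; dot-merged pattern) whose results are
-- combined afterwards — a different decomposition of the same search, same cost.

-- ===== PORT A =====
-- the 'for ind in (...)' loop body of A, over the remaining candidate indices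
def pvPiiGo (sl : List String) (l : List String) : List Int → Option (Int × Int)
  | [] => none
  | ind :: rest =>
    let sll : Int := sl.length
    if PySem.List.slice l (some ind) (some (ind + sll)) = sl then
      some (ind, ind + sll)
    else if PySem.List.pyGet? sl (-1) = some "." then
      match PySem.List.pyGet? l (ind + sll - 1) with
      | none => none   -- Python raises IndexError on l[ind+sll-1] (excluded by Pre_)
      | some nxt =>
        if nxt = "." then pvPiiGo sl l rest
        else
          match (PySem.List.slice sl none (some (-1))).getLast? with
          | none => none   -- Python raises IndexError on sl_t[-1]
          | some lt =>
            if PySem.List.slice l (some ind) (some (ind + sll - 1)) =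
                (PySem.List.slice sl none (some (-1))).dropLast ++ [lt ++ "."] then
              some (ind, ind + sll - 1)
            else pvPiiGo sl l rest
    else pvPiiGo sl l rest

def pii_locator (sl : List String) (l : List String) : Option (Int × Int) :=
  pvPiiGo sl l (((PySem.List.enumerate l).filter
      (fun p => decide (some p.2 = PySem.List.pyGet? sl 0))).map (·.1))

-- ===== PORT B =====
-- first start index at which pat occurs as a contiguous sublist of l (Source B's first_at)
def pvFirstAt (l : List String) (pat : List String) : Option Int :=
  (PySem.List.pyRange 0 ((l.length : Int) - pat.length + 1)).find?
    (fun i => decide (PySem.List.slice l (some i) (some (i + pat.length)) = pat))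

def pii_locator_alt (sl : List String) (l : List String) : Option (Int × Int) :=
  if sl = [] then none else
  let m : Int := sl.length
  let n : Int := l.length
  let i1 := pvFirstAt l sl
  let i2 : Option Int :=
    if 3 ≤ sl.length ∧ PySem.List.pyGet? sl (-1) = some "." then
      match PySem.List.pyGet? sl (-2) with
      | none => none   -- unreachable: len(sl) ≥ 3
      | some p =>
        let pat := PySem.List.slice sl none (some (-2)) ++ [p ++ "."]
        (PySem.List.pyRange 0 (n - m + 2)).find?
          (fun i => decide (PySem.List.slice l (some i) (some (i + m - 1)) = pat ∧
                            (n ≤ i + m - 1 ∨ PySem.List.pyGet? l (i + m - 1) ≠ some ".")))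
    else none
  match i1, i2 with
  | some a, none => some (a, a + m)
  | some a, some b => if a ≤ b then some (a, a + m) else some (b, b + m - 1)
  | none, some b => some (b, b + m - 1)
  | none, none => none

-- ===== PRECONDITION & SPEC =====

-- Bool test: position i of l starts an exact occurrence of sl
def pvEb (sl l : List String) (i : Int) : Bool :=
  decide (PySem.List.slice l (some i) (some (i + (sl.length : Int))) = sl)

-- the dot-merged pattern sl[:-2] + [sl[-2] + '.']
def pvPat (sl : List String) : List String :=
  PySem.List.slice sl none (some (-2)) ++ [(PySem.List.pyGet? sl (-2)).getD "" ++ "."]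

def pvGuard (sl : List String) : Bool :=
  decide (3 ≤ sl.length ∧ PySem.List.pyGet? sl (-1) = some ".")

-- Bool test: position i of l starts a dot-merged occurrence not followed by '.'
def pvDb (sl l : List String) (i : Int) : Bool :=
  pvGuard sl &&
  decide (PySem.List.slice l (some i) (some (i + (sl.length : Int) - 1)) = pvPat sl ∧
          ((l.length : Int) ≤ i + (sl.length : Int) - 1 ∨
           PySem.List.pyGet? l (i + (sl.length : Int) - 1) ≠ some "."))

-- the exact condition under which A's loop reaches l[ind+sll-1] with ind+sll-1 ≥ len(l)
-- and raises IndexError: sl ends in '.', some position of sl[0] in l starts less than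
-- len(sl) tokens before the end of l, and no in-range position of sl[0] starts an exact
-- or dot-merged match (so no candidate returns before the out-of-range index is reached)
def pvRCond (sl l : List String) : Prop :=
  sl.getLast? = some "." ∧
  (∃ k ∈ List.range l.length, l[k]? = sl[0]? ∧ l.length < k + sl.length) ∧
  (∀ j ∈ List.range l.length, l[j]? = sl[0]? → j + sl.length ≤ l.length →
     pvEb sl l (j : Int) = false ∧ pvDb sl l (j : Int) = false)

-- Pre_ excludes exactly the inputs on which Python A raises IndexError (empty sl with
-- nonempty l evaluating sl[0]; or pvRCond, where A evaluates l[ind+sll-1] out of range).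
def Pre_pii_locator (sl : List String) (l : List String) : Prop :=
  (sl = [] → l = []) ∧ ¬ pvRCond sl l
instance (sl : List String) (l : List String) : Decidable (Pre_pii_locator sl l) := by
  unfold Pre_pii_locator pvRCond; infer_instance
def pvWitness_pii_locator : List String × List String := (["a"], ["a"])

def Spec_pii_locator (sl : List String) (l : List String) (out : Option (Int × Int)) : Prop := out = pii_locator_alt sl l
instance (sl : List String) (l : List String) (out : Option (Int × Int)) : Decidable (Spec_pii_locator sl l out) := by unfold Spec_pii_locator; infer_instance

-- ===== CLAIM (what is proved, stated in full; the proofs are below) =====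
def Claim_equal_pii_locator : Prop := ∀ (sl : List String) (l : List String), Dom_pii_locator sl l → Pre_pii_locator sl l → Spec_pii_locator sl l (pii_locator sl l)


-- ===== LEMMAS AND PROOFS =====

-- the event at position i: what A returns if its loop body fires at candidate i
def pvEv (sl l : List String) (i : Int) : Option (Int × Int) :=
  if pvEb sl l i then some (i, i + (sl.length : Int))
  else if pvDb sl l i then some (i, i + (sl.length : Int) - 1)
  else none

-- first-occurrence over a filtered list equals over the whole list when the
-- event function is none off the filter
theorem pvFindSome_filter {a b : Type} (cs : List a) (q : a -> Bool) (f : a -> Option b)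
    (h : forall i, i ∈ cs -> q i = false -> f i = none) :
    (cs.filter q).findSome? f = cs.findSome? f := by
  induction cs with
  | nil => rfl
  | cons c cs ih =>
    by_cases hq : q c
    · rw [List.filter_cons_of_pos hq, List.findSome?_cons, List.findSome?_cons]
      cases f c <;> simp [ih (fun i hi => h i (List.mem_cons_of_mem _ hi))]
    · rw [List.filter_cons_of_neg (by simpa using hq), List.findSome?_cons,
        h c (List.mem_cons_self ..) (by simpa using hq)]
      exact ih (fun i hi => h i (List.mem_cons_of_mem _ hi))

-- on a strictly increasing list, the first P-or-Q event is determined by the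
-- first P-position and the first Q-position separately
theorem pvCombine {a b : Type} [LinearOrder a] (cs : List a) (P Q : a -> Bool)
    (f g : a -> b) (hs : cs.Pairwise (· < ·)) (hx : forall i, ¬(P i = true ∧ Q i = true)) :
    cs.findSome? (fun i => if P i then some (f i) else if Q i then some (g i) else none)
    = (match cs.find? P, cs.find? Q with
      | some x, none => some (f x)
      | some x, some y => if x ≤ y then some (f x) else some (g y)
      | none, some y => some (g y)
      | none, none => none) := by
  induction cs with
  | nil => rfl
  | cons c cs ih =>
    obtain ⟨hlt, hs'⟩ := List.pairwise_cons.mp hs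
    rw [List.findSome?_cons]
    by_cases hP : P c
    · have hQ : ¬ Q c = true := fun hq => hx c ⟨hP, hq⟩
      rw [List.find?_cons_of_pos hP, List.find?_cons_of_neg hQ]
      simp only [hP, if_true]
      cases hfq : cs.find? Q with
      | none => rfl
      | some y =>
        have : c < y := hlt y (List.mem_of_find?_eq_some hfq)
        simp [le_of_lt this]
    · rw [List.find?_cons_of_neg hP]
      by_cases hQ : Q c
      · rw [List.find?_cons_of_pos hQ]
        simp only [hP, Bool.false_eq_true, if_false, hQ, if_true]
        cases hfp : cs.find? P with
        | none => rfl
        | some x =>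
          have : c < x := hlt x (List.mem_of_find?_eq_some hfp)
          simp [not_le.mpr this]
      · rw [List.find?_cons_of_neg hQ]
        simp only [hP, hQ, Bool.false_eq_true, if_false]
        exact ih hs'

-- find? over range b = find? over range a when every hit lies below a
theorem pvRangeFindExt (a b : Nat) (P : Nat -> Bool) (hab : a ≤ b)
    (h : forall k, P k = true -> k < a) :
    (List.range b).find? P = (List.range a).find? P := by
  obtain ⟨c, rfl⟩ := Nat.exists_eq_add_of_le hab
  rw [List.range_add, List.find?_append]
  have hnone : (List.map (fun x => a + x) (List.range c)).find? P = none := by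
    rw [List.find?_eq_none]
    intro x hx
    simp only [List.mem_map] at hx
    obtain ⟨y, _, rfl⟩ := hx
    intro hP
    exact absurd (h _ hP) (by omega)
  rw [hnone]
  cases (List.range a).find? P <;> rfl

-- the candidate indices A iterates over, as a filtered range
theorem pvEnumFilter {a : Type} [DecidableEq a] (l : List a) (o : Option a) (s : Int) :
    ((PySem.List.enumerate l s).filter (fun p => decide (some p.2 = o))).map (·.1)
    = ((List.range l.length).filter (fun k => decide (l[k]? = o))).map (fun k : Nat => s + (k : Int)) := by
  induction l generalizing s with
  | nil => rfl
  | cons x t ih =>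
    rw [PySem.List.enumerate_cons, List.length_cons, List.range_succ_eq_map]
    have hfilter : List.filter ((fun k => decide ((x::t)[k]? = o)) ∘ Nat.succ) (List.range t.length)
        = List.filter (fun k => decide (t[k]? = o)) (List.range t.length) := by
      apply List.filter_congr; intro k _; simp
    have htail : (List.filter (fun k => decide ((x::t)[k]? = o)) (List.map Nat.succ (List.range t.length))).map (fun k : Nat => s + (k : Int))
        = (List.filter (fun k => decide (t[k]? = o)) (List.range t.length)).map (fun k : Nat => (s + 1) + (k : Int)) := by
      rw [List.filter_map, hfilter, List.map_map]
      apply List.map_congr_left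
      intro k _
      simp only [Function.comp]
      push_cast
      ring
    by_cases hx : some x = o
    · rw [List.filter_cons_of_pos (by simpa using hx),
        List.filter_cons_of_pos (by simp [hx]), List.map_cons, List.map_cons, ih (s+1), htail]
      simp
    · rw [List.filter_cons_of_neg (by simpa using hx),
        List.filter_cons_of_neg (by simp [hx]), ih (s+1), htail]

-- a full-length slice match pins down the element at its start
theorem pvHeadOfSlice {a : Type} (l : List a) (k t : Nat) (pat : List a) (ht : 0 < t)
    (h : (l.drop k).take t = pat) : l[k]? = pat.head? := by
  subst h
  rw [List.head?_take, List.head?_drop]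
  simp [Nat.pos_iff_ne_zero.mp ht]

-- splitting off the last two elements
theorem pvTwoSplit {a : Type} (sl : List a) (h : 2 ≤ sl.length) :
    ∃ ys x y, sl = ys ++ [x, y] := by
  have h' : 2 ≤ sl.reverse.length := by simpa
  rcases hr : sl.reverse with _ | ⟨y, t⟩
  · rw [hr] at h'; simp at h'
  · rcases ht : t with _ | ⟨x, ys⟩
    · rw [hr, ht] at h'; simp at h'
    · refine ⟨ys.reverse, x, y, ?_⟩
      rw [← sl.reverse_reverse, hr, ht]
      simp

-- a string never equals itself with '.' appended
theorem pvNeAppendDot (s : String) : s ≠ s ++ "." := by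
  intro h
  have := congrArg (fun z => z.toList.length) h
  simp [String.toList_append] at this

-- the dot pattern of a two-split list
theorem pvPat_eq (ys : List String) (x y : String) :
    pvPat (ys ++ [x, y]) = ys ++ [x ++ "."] := by
  unfold pvPat
  rw [PySem.List.slice_to_neg_ofNat _ 2 (by norm_num),
    PySem.List.pyGet?_neg_ofNat _ 2 (by norm_num) (by simp)]
  have hlen : (ys ++ [x, y]).length - 2 = ys.length := by simp
  rw [hlen]
  have : (ys ++ [x, y])[ys.length]? = some x := by
    rw [List.getElem?_append_right (le_refl _)]
    simp
  rw [this, List.take_left]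
  rfl

-- one unfolding of A's loop
theorem pvPiiGo_cons (sl l : List String) (c : Int) (rest : List Int) :
    pvPiiGo sl l (c :: rest) =
      (if PySem.List.slice l (some c) (some (c + (sl.length : Int))) = sl then
        some (c, c + (sl.length : Int))
      else if PySem.List.pyGet? sl (-1) = some "." then
        match PySem.List.pyGet? l (c + (sl.length : Int) - 1) with
        | none => none
        | some nxt =>
          if nxt = "." then pvPiiGo sl l rest
          else
            match (PySem.List.slice sl none (some (-1))).getLast? with
            | none => none
            | some lt =>
              if PySem.List.slice l (some c) (some (c + (sl.length : Int) - 1)) =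
                  (PySem.List.slice sl none (some (-1))).dropLast ++ [lt ++ "."] then
                some (c, c + (sl.length : Int) - 1)
              else pvPiiGo sl l rest
      else pvPiiGo sl l rest) := rfl

-- rewriting i + m - 1 into natCast shape
theorem pvCastM1 (k m : Nat) (hm : 1 ≤ m) :
    (k : Int) + (m : Int) - 1 = (k : Int) + ((m - 1 : Nat) : Int) := by
  rw [Nat.cast_sub hm]; push_cast; ring

-- exact occurrence forces the candidate's token
theorem pvEb_cand (s0 : String) (tl l : List String) (k : Nat)
    (h : pvEb (s0 :: tl) l (k : Int) = true) : l[k]? = some s0 := by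
  rw [pvEb, decide_eq_true_eq, PySem.List.slice_natCast_add] at h
  have := pvHeadOfSlice l k (s0 :: tl).length (s0 :: tl) (by simp) h
  simpa using this

-- dot occurrence forces the candidate's token
theorem pvDb_cand (s0 : String) (tl l : List String) (k : Nat)
    (h : pvDb (s0 :: tl) l (k : Int) = true) : l[k]? = some s0 := by
  rw [pvDb, Bool.and_eq_true, pvGuard, decide_eq_true_eq, decide_eq_true_eq] at h
  obtain ⟨⟨h3, _⟩, hsli, _⟩ := h
  rw [pvCastM1 k (s0 :: tl).length (by simp), PySem.List.slice_natCast_add] at hsli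
  obtain ⟨ys, x, y, hys⟩ := pvTwoSplit (s0 :: tl) (by omega)
  have hlys : (s0 :: tl).length = ys.length + 2 := by rw [hys]; simp
  have hpat : pvPat (s0 :: tl) = ys ++ [x ++ "."] := by rw [hys]; exact pvPat_eq ys x y
  rw [hpat] at hsli
  have hhd := pvHeadOfSlice l k ((s0 :: tl).length - 1) (ys ++ [x ++ "."]) (by omega) hsli
  rcases ys with _ | ⟨y0, ys'⟩
  · rw [hlys] at h3; simp at h3
  · have hy0 : some s0 = some y0 := by simpa using congrArg (fun z => z.head?) hys
    have hlk : l[k]? = some y0 := by simpa using hhd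
    rw [hlk]; exact hy0.symm

-- positions not holding sl[0] carry no event
theorem pvEv_none (s0 : String) (tl l : List String) (k : Nat)
    (hk : ¬ l[k]? = some s0) : pvEv (s0 :: tl) l (k : Int) = none := by
  rw [pvEv]
  rw [if_neg (fun h => hk (pvEb_cand s0 tl l k h)),
    if_neg (fun h => hk (pvDb_cand s0 tl l k h))]

-- exact and dot occurrence cannot both start at the same position
theorem pvNotBoth (s0 : String) (tl l : List String) (k : Nat) :
    ¬ (pvEb (s0 :: tl) l (k : Int) = true ∧ pvDb (s0 :: tl) l (k : Int) = true) := by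
  rintro ⟨hE, hD⟩
  rw [pvEb, decide_eq_true_eq, PySem.List.slice_natCast_add] at hE
  rw [pvDb, Bool.and_eq_true, pvGuard, decide_eq_true_eq, decide_eq_true_eq] at hD
  obtain ⟨⟨h3, _⟩, hsli, _⟩ := hD
  rw [pvCastM1 k (s0 :: tl).length (by simp), PySem.List.slice_natCast_add] at hsli
  obtain ⟨ys, x, y, hys⟩ := pvTwoSplit (s0 :: tl) (by omega)
  have hlys : (s0 :: tl).length = ys.length + 2 := by rw [hys]; simp
  have hpat : pvPat (s0 :: tl) = ys ++ [x ++ "."] := by rw [hys]; exact pvPat_eq ys x y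
  rw [hpat] at hsli
  have htk : (l.drop k).take ((s0 :: tl).length - 1) = (s0 :: tl).take ((s0 :: tl).length - 1) := by
    have hc := congrArg (List.take ((s0 :: tl).length - 1)) hE
    rw [List.take_take, Nat.min_eq_left (by omega)] at hc
    exact hc
  have h1 : (s0 :: tl).take ((s0 :: tl).length - 1) = ys ++ [x] := by
    rw [hys, show (ys ++ [x, y]).length - 1 = ys.length + 1 from by simp, List.take_append]
    simp
  rw [htk, h1] at hsli
  have hx : x = x ++ "." := by simpa using List.append_cancel_left hsli
  exact pvNeAppendDot x hx

-- A's loop at a candidate k that cannot raise (in-range dot index, or no dot suffix)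
-- fires pvEv k or falls through to the rest of the candidates
theorem pvStep (s0 : String) (tl l : List String) (k : Nat) (rest : List Int)
    (hkn : k < l.length) (hcand : l[k]? = some s0)
    (hsafe : k + (s0 :: tl).length ≤ l.length ∨ ¬ PySem.List.pyGet? (s0 :: tl) (-1) = some ".") :
    pvPiiGo (s0 :: tl) l ((k : Int) :: rest) =
      (if pvEb (s0 :: tl) l (k : Int) then some ((k : Int), (k : Int) + ((s0 :: tl).length : Int))
      else if pvDb (s0 :: tl) l (k : Int) then some ((k : Int), (k : Int) + ((s0 :: tl).length : Int) - 1)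
      else pvPiiGo (s0 :: tl) l rest) := by
  rw [pvPiiGo_cons]
  set sl := s0 :: tl with hsl
  have hm1 : 1 ≤ sl.length := by simp [hsl]
  by_cases hE : PySem.List.slice l (some (k : Int)) (some ((k : Int) + (sl.length : Int))) = sl
  · have hEb : pvEb sl l (k : Int) = true := by rw [pvEb, decide_eq_true_eq]; exact hE
    rw [if_pos hE, if_pos hEb]
  · have hEb : pvEb sl l (k : Int) = false := by
      rw [pvEb, decide_eq_false_iff_not]; exact hE
    rw [if_neg hE]
    simp only [hEb, Bool.false_eq_true, if_false]
    by_cases hdot : PySem.List.pyGet? sl (-1) = some "."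
    · rw [if_pos hdot]
      have hklen : k + sl.length ≤ l.length := hsafe.resolve_right (fun h => h hdot)
      have hidx : (k : Int) + (sl.length : Int) - 1 = ((k + sl.length - 1 : Nat) : Int) := by
        push_cast [Nat.cast_sub (by omega : 1 ≤ k + sl.length)]; ring
      have hin : k + sl.length - 1 < l.length := by omega
      have hget : PySem.List.pyGet? l ((k : Int) + (sl.length : Int) - 1) =
          some (l[k + sl.length - 1]'hin) := by
        rw [hidx, PySem.List.pyGet?_natCast, List.getElem?_eq_getElem hin]
      rw [hget]
      dsimp only
      by_cases hnxt : l[k + sl.length - 1]'hin = "."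
      · rw [if_pos hnxt]
        have hDb : pvDb sl l (k : Int) = false := by
          rw [pvDb]
          apply Bool.and_eq_false_iff.mpr
          right
          rw [decide_eq_false_iff_not]
          rintro ⟨-, hcond⟩
          rcases hcond with hcond | hcond
          · rw [hidx] at hcond; simp at hcond; omega
          · exact hcond (by rw [hget, hnxt])
        simp only [hDb, Bool.false_eq_true, if_false]
      · rw [if_neg hnxt]
        -- here len(sl) ≥ 2: otherwise the exact slice would have matched
        rcases htl : tl with _ | ⟨t1, tl'⟩
        · exfalso
          apply hE
          have hkn' : k < l.length := hkn
          rw [hsl, htl]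
          rw [show ((([s0] : List String).length : Int)) = ((1:Nat) : Int) from by simp]
          rw [PySem.List.slice_natCast_add, List.drop_eq_getElem_cons hkn']
          have : l[k] = s0 := by
            have := hcand; rw [List.getElem?_eq_getElem hkn'] at this; simpa using this
          simp [this]
        · have h2 : 2 ≤ sl.length := by rw [hsl, htl]; simp
          obtain ⟨ys, x, y, hys⟩ := pvTwoSplit sl h2
          have hylast : y = "." := by
            rw [PySem.List.pyGet?_neg_one, hys] at hdot
            simpa using hdot
          have hslast : PySem.List.slice sl none (some (-1)) = ys ++ [x] := by
            rw [PySem.List.slice_to_neg_one, hys]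
            simp
          rw [hslast]
          have hgl : (ys ++ [x]).getLast? = some x := by simp
          rw [hgl]
          dsimp only
          have hdl : (ys ++ [x]).dropLast = ys := by simp
          rw [hdl]
          have hpat : ys ++ [x ++ "."] = pvPat sl := by rw [hys, pvPat_eq]
          rw [hpat]
          by_cases hD : PySem.List.slice l (some (k : Int)) (some ((k : Int) + (sl.length : Int) - 1)) = pvPat sl
          · rw [if_pos hD]
            -- the dot event fires here; in particular len(sl) ≥ 3
            have hys_ne : ys ≠ [] := by
              rintro rfl
              have hx0 : some s0 = some x := by
                have h := congrArg (fun z => z.head?) hys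
                rw [hsl] at h
                simpa using h
              have hx0' : x = s0 := by injection hx0 with h; exact h.symm
              rw [pvCastM1 k sl.length hm1, PySem.List.slice_natCast_add] at hD
              rw [← hpat] at hD
              have hlen1 : sl.length - 1 = 1 := by
                rw [hys]; simp
              rw [hlen1, List.drop_eq_getElem_cons hkn] at hD
              have hlk : l[k] = s0 := by
                have := hcand; rw [List.getElem?_eq_getElem hkn] at this; simpa using this
              simp only [List.take_succ_cons, List.take_zero] at hD
              rw [hlk, hx0'] at hD
              have : s0 = s0 ++ "." := by simpa using hD
              exact pvNeAppendDot s0 this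
            have h3 : 3 ≤ sl.length := by
              rw [hys]
              rcases ys with _ | ⟨y0, ys'⟩
              · exact absurd rfl hys_ne
              · simp
            have hDb : pvDb sl l (k : Int) = true := by
              rw [pvDb, Bool.and_eq_true, pvGuard, decide_eq_true_eq, decide_eq_true_eq]
              refine ⟨⟨h3, hdot⟩, hD, Or.inr ?_⟩
              rw [hget]
              intro hc
              exact hnxt (by simpa using hc)
            simp only [hDb, if_true]
          · rw [if_neg hD]
            have hDb : pvDb sl l (k : Int) = false := by
              rw [pvDb]
              apply Bool.and_eq_false_iff.mpr
              right
              rw [decide_eq_false_iff_not]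
              rintro ⟨hsli, -⟩
              exact hD hsli
            simp only [hDb, Bool.false_eq_true, if_false]
    · rw [if_neg hdot]
      have hDb : pvDb sl l (k : Int) = false := by
        rw [pvDb]
        apply Bool.and_eq_false_iff.mpr
        left
        rw [pvGuard, decide_eq_false_iff_not]
        rintro ⟨-, hd⟩
        exact hdot hd
      simp only [hDb, Bool.false_eq_true, if_false]

-- A's loop over candidate indices returns the first event, provided every candidate
-- at which A would raise is preceded by a candidate carrying an event
theorem pvPiiGo_eq (s0 : String) (tl l : List String) (cs : List Nat)
    (hcand : ∀ k ∈ cs, k < l.length ∧ l[k]? = some s0)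
    (hsafe : ∀ xs k ys, cs = xs ++ k :: ys → l.length < k + (s0 :: tl).length →
        PySem.List.pyGet? (s0 :: tl) (-1) = some "." →
        ∃ x ∈ xs, pvEv (s0 :: tl) l (Int.ofNat x) ≠ none) :
    pvPiiGo (s0 :: tl) l (cs.map (fun k : Nat => (k : Int)))
      = cs.findSome? (fun k : Nat => pvEv (s0 :: tl) l (k : Int)) := by
  induction cs with
  | nil => rfl
  | cons k cs ih =>
    obtain ⟨hkn, hc⟩ := hcand k (List.mem_cons_self ..)
    have hsafe_k : k + (s0 :: tl).length ≤ l.length ∨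
        ¬ PySem.List.pyGet? (s0 :: tl) (-1) = some "." := by
      by_cases hkm : k + (s0 :: tl).length ≤ l.length
      · exact Or.inl hkm
      · by_cases hd : PySem.List.pyGet? (s0 :: tl) (-1) = some "."
        · obtain ⟨x, hx, -⟩ := hsafe [] k cs rfl (by omega) hd
          simp at hx
        · exact Or.inr hd
    rw [List.map_cons, pvStep s0 tl l k _ hkn hc hsafe_k, List.findSome?_cons]
    by_cases hEb : pvEb (s0 :: tl) l (k : Int)
    · simp only [pvEv, hEb, if_true]
    · by_cases hDb : pvDb (s0 :: tl) l (k : Int)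
      · simp only [pvEv, hEb, hDb, Bool.false_eq_true, if_false, if_true]
      · have hev : pvEv (s0 :: tl) l (k : Int) = none := by
          rw [pvEv, if_neg (by simp [hEb]), if_neg (by simp [hDb])]
        simp only [hEb, hDb, Bool.false_eq_true, if_false, hev]
        refine ih (fun j hj => hcand j (List.mem_cons_of_mem _ hj)) ?_
        intro xs k' ys hsplit hbig hd
        obtain ⟨x, hx, hxev⟩ := hsafe (k :: xs) k' ys (by rw [hsplit]; rfl) hbig hd
        rcases List.mem_cons.mp hx with rfl | hx'
        · exact absurd hev hxev
        · exact ⟨x, hx', hxev⟩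

-- an exact occurrence fits inside l
theorem pvPbound (s0 : String) (tl l : List String) (k : Nat)
    (hk : pvEb (s0 :: tl) l (k : Int) = true) :
    k + (s0 :: tl).length ≤ l.length := by
  rw [pvEb, decide_eq_true_eq, PySem.List.slice_natCast_add] at hk
  have hlen := congrArg List.length hk
  simp only [List.length_take, List.length_drop] at hlen
  have : 1 ≤ (s0 :: tl).length := by simp
  omega

-- a dot occurrence fits inside l (one token shorter)
theorem pvQbound (s0 : String) (tl l : List String) (k : Nat)
    (hk : pvDb (s0 :: tl) l (k : Int) = true) :
    k + ((s0 :: tl).length - 1) ≤ l.length ∧ 3 ≤ (s0 :: tl).length := by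
  rw [pvDb, Bool.and_eq_true, pvGuard, decide_eq_true_eq, decide_eq_true_eq] at hk
  obtain ⟨⟨h3, _⟩, hsli, _⟩ := hk
  rw [pvCastM1 k (s0 :: tl).length (by simp), PySem.List.slice_natCast_add] at hsli
  obtain ⟨ys, x, y, hys⟩ := pvTwoSplit (s0 :: tl) (by omega)
  have hlys : (s0 :: tl).length = ys.length + 2 := by rw [hys]; simp
  have hpat : pvPat (s0 :: tl) = ys ++ [x ++ "."] := by rw [hys]; exact pvPat_eq ys x y
  rw [hpat] at hsli
  have hlen := congrArg List.length hsli
  simp only [List.length_take, List.length_drop, List.length_append, List.length_singleton] at hlen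
  constructor
  · omega
  · exact h3

theorem pvMain (sl l : List String) (hpre : Pre_pii_locator sl l) :
    pii_locator sl l = pii_locator_alt sl l := by
  rcases sl with _ | ⟨s0, tl⟩
  · have hl : l = [] := hpre.1 rfl
    subst hl
    rfl
  · have hne : (s0 :: tl) ≠ [] := by simp
    have hm1 : 1 ≤ (s0 :: tl).length := by simp
    -- A as the first event over the whole index range
    have hA : pii_locator (s0 :: tl) l =
        (List.range l.length).findSome? (fun k : Nat => pvEv (s0 :: tl) l (k : Int)) := by
      rw [pii_locator]
      have ho : PySem.List.pyGet? (s0 :: tl) 0 = some s0 := by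
        rw [PySem.List.pyGet?_zero]; rfl
      rw [pvEnumFilter l (PySem.List.pyGet? (s0 :: tl) 0) 0, ho,
        show (fun k : Nat => (0 : Int) + (k : Int)) = (fun k : Nat => (k : Int)) from by
          funext k; simp]
      have hcand : ∀ k ∈ (List.range l.length).filter (fun k => decide (l[k]? = some s0)),
          k < l.length ∧ l[k]? = some s0 := by
        intro k hk
        simp only [List.mem_filter, List.mem_range] at hk
        exact ⟨hk.1, of_decide_eq_true hk.2⟩
      have hsafe : ∀ xs k ys,
          (List.range l.length).filter (fun k => decide (l[k]? = some s0)) = xs ++ k :: ys →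
          l.length < k + (s0 :: tl).length →
          PySem.List.pyGet? (s0 :: tl) (-1) = some "." →
          ∃ x ∈ xs, pvEv (s0 :: tl) l (Int.ofNat x) ≠ none := by
        intro xs k ys hsplit hbig hd
        have hdot' : (s0 :: tl).getLast? = some "." := by
          rw [← PySem.List.pyGet?_neg_one]; exact hd
        have hkmem : k ∈ (List.range l.length).filter (fun k => decide (l[k]? = some s0)) := by
          rw [hsplit]; exact List.mem_append_right _ (List.mem_cons_self ..)
        have hkc := hcand k hkmem
        -- Pre_ rules out pvRCond; its existential is witnessed by k, so its ∀ must fail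
        have hnR := hpre.2
        rw [pvRCond] at hnR
        push Not at hnR
        obtain ⟨j, hjr, hjc, hjlow, hjev⟩ := hnR hdot'
          ⟨k, List.mem_range.mpr hkc.1, by simpa using hkc.2, by omega⟩
        have hjc' : l[j]? = some s0 := by simpa using hjc
        have hjn : j < l.length := List.mem_range.mp hjr
        have hev : pvEv (s0 :: tl) l (Int.ofNat j) ≠ none := by
          intro hcontra
          rw [pvEv] at hcontra
          by_cases hEb : pvEb (s0 :: tl) l (Int.ofNat j) = true
          · rw [if_pos hEb] at hcontra; simp at hcontra
          · by_cases hDb : pvDb (s0 :: tl) l (Int.ofNat j) = true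
            · rw [if_neg hEb, if_pos hDb] at hcontra; simp at hcontra
            · exact absurd (Bool.eq_false_iff.mpr hDb)
                (hjev (Bool.eq_false_iff.mpr hEb))
        -- j precedes k in the (strictly increasing) candidate list
        have hjk : j < k := by omega
        have hpw : ((List.range l.length).filter (fun k => decide (l[k]? = some s0))).Pairwise (· < ·) :=
          (List.pairwise_lt_range).filter _
        have hjmem : j ∈ (List.range l.length).filter (fun k => decide (l[k]? = some s0)) := by
          simp only [List.mem_filter, List.mem_range]
          exact ⟨hjn, by simpa using hjc'⟩
        rw [hsplit] at hjmem hpw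
        rcases List.mem_append.mp hjmem with hjx | hjky
        · exact ⟨j, hjx, hev⟩
        · exfalso
          have hky := (List.pairwise_append.mp hpw).2.1
          rcases List.mem_cons.mp hjky with rfl | hjy
          · omega
          · exact absurd ((List.pairwise_cons.mp hky).1 j hjy) (by omega)
      rw [pvPiiGo_eq s0 tl l _ hcand hsafe]
      exact pvFindSome_filter (List.range l.length) _ _
        (fun k _ hq => pvEv_none s0 tl l k (by simpa using hq))
    -- B's exact search over the whole index range
    have hi1 : pvFirstAt l (s0 :: tl) =
        ((List.range l.length).find? (fun k : Nat => pvEb (s0 :: tl) l (k : Int))).map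
          (fun k : Nat => (k : Int)) := by
      rw [pvFirstAt, PySem.List.pyRange_one, List.find?_map,
        show ((fun i : Int => decide (PySem.List.slice l (some i)
            (some (i + ((s0 :: tl).length : Int))) = (s0 :: tl))) ∘ (fun k : Nat => (0 : Int) + (k : Int)))
          = fun k : Nat => pvEb (s0 :: tl) l (k : Int) from by
          funext k; simp [Function.comp, pvEb],
        show (fun k : Nat => (0 : Int) + (k : Int)) = (fun k : Nat => (k : Int)) from by
          funext k; simp]
      rw [pvRangeFindExt ((((l.length : Int) - ((s0 :: tl).length : Int) + 1) - 0).toNat) l.length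
        (fun k : Nat => pvEb (s0 :: tl) l (k : Int)) (by omega)
        (fun k hk => by have := pvPbound s0 tl l k hk; omega)]
    -- B's dot search over the whole index range / or no dot search at all
    by_cases hg : 3 ≤ (s0 :: tl).length ∧ PySem.List.pyGet? (s0 :: tl) (-1) = some "."
    · obtain ⟨h3, hdot⟩ := hg
      obtain ⟨ys, x, y, hys⟩ := pvTwoSplit (s0 :: tl) (by omega)
      have h2get : PySem.List.pyGet? (s0 :: tl) (-2) = some x := by
        rw [PySem.List.pyGet?_neg_ofNat _ 2 (by norm_num) (by omega), hys,
          show (ys ++ [x, y]).length - 2 = ys.length from by simp,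
          List.getElem?_append_right (le_refl _)]
        simp
      have hgd : pvGuard (s0 :: tl) = true := by
        rw [pvGuard, decide_eq_true_eq]; exact ⟨h3, hdot⟩
      have hpatB : PySem.List.slice (s0 :: tl) none (some (-2)) ++ [x ++ "."] = pvPat (s0 :: tl) := by
        rw [pvPat, h2get]
        rfl
      have hi2 : (PySem.List.pyRange 0 ((l.length : Int) - ((s0 :: tl).length : Int) + 2)).find?
            (fun i : Int => decide (PySem.List.slice l (some i)
              (some (i + ((s0 :: tl).length : Int) - 1)) = PySem.List.slice (s0 :: tl) none (some (-2)) ++ [x ++ "."] ∧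
              ((l.length : Int) ≤ i + ((s0 :: tl).length : Int) - 1 ∨
               PySem.List.pyGet? l (i + ((s0 :: tl).length : Int) - 1) ≠ some ".")))
          = ((List.range l.length).find? (fun k : Nat => pvDb (s0 :: tl) l (k : Int))).map
            (fun k : Nat => (k : Int)) := by
        rw [PySem.List.pyRange_one, List.find?_map,
          show ((fun i : Int => decide (PySem.List.slice l (some i)
              (some (i + ((s0 :: tl).length : Int) - 1)) = PySem.List.slice (s0 :: tl) none (some (-2)) ++ [x ++ "."] ∧
              ((l.length : Int) ≤ i + ((s0 :: tl).length : Int) - 1 ∨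
               PySem.List.pyGet? l (i + ((s0 :: tl).length : Int) - 1) ≠ some "."))) ∘ (fun k : Nat => (0 : Int) + (k : Int)))
            = fun k : Nat => pvDb (s0 :: tl) l (k : Int) from by
            funext k
            simp only [Function.comp, pvDb, hgd, Bool.true_and, zero_add, hpatB],
          show (fun k : Nat => (0 : Int) + (k : Int)) = (fun k : Nat => (k : Int)) from by
            funext k; simp]
        rw [pvRangeFindExt ((((l.length : Int) - ((s0 :: tl).length : Int) + 2) - 0).toNat) l.length
          (fun k : Nat => pvDb (s0 :: tl) l (k : Int)) (by omega)
          (fun k hk => by have := pvQbound s0 tl l k hk; omega)]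
      -- assemble
      rw [hA,
        show (fun k : Nat => pvEv (s0 :: tl) l (k : Int))
          = (fun k : Nat => if (fun k : Nat => pvEb (s0 :: tl) l (k : Int)) k then
              some ((fun k : Nat => ((k : Int), (k : Int) + ((s0 :: tl).length : Int))) k)
            else if (fun k : Nat => pvDb (s0 :: tl) l (k : Int)) k then
              some ((fun k : Nat => ((k : Int), (k : Int) + ((s0 :: tl).length : Int) - 1)) k)
            else none) from by funext k; rfl,
        pvCombine (List.range l.length) _ _ _ _ List.pairwise_lt_range
          (fun k => pvNotBoth s0 tl l k)]
      rw [pii_locator_alt, if_neg hne]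
      dsimp only
      rw [if_pos ⟨h3, hdot⟩, h2get]
      dsimp only
      rw [hi1, hi2]
      cases hfp : (List.range l.length).find? (fun k : Nat => pvEb (s0 :: tl) l (k : Int)) with
      | none =>
        cases hfq : (List.range l.length).find? (fun k : Nat => pvDb (s0 :: tl) l (k : Int)) with
        | none => rfl
        | some b => rfl
      | some a =>
        cases hfq : (List.range l.length).find? (fun k : Nat => pvDb (s0 :: tl) l (k : Int)) with
        | none => rfl
        | some b =>
          dsimp only [Option.map]
          by_cases hab : a ≤ b
          · rw [if_pos hab, if_pos (show ((a : Nat) : Int) ≤ ((b : Nat) : Int) from by exact_mod_cast hab)]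
          · rw [if_neg hab, if_neg (show ¬ ((a : Nat) : Int) ≤ ((b : Nat) : Int) from by exact_mod_cast hab)]
    · -- no dot pattern: the dot search is empty on both sides
      have hgd : pvGuard (s0 :: tl) = false := by
        rw [pvGuard, decide_eq_false_iff_not]; exact hg
      have hfq : (List.range l.length).find? (fun k : Nat => pvDb (s0 :: tl) l (k : Int)) = none := by
        rw [List.find?_eq_none]
        intro k _
        rw [pvDb, hgd, Bool.false_and]
        simp
      rw [hA,
        show (fun k : Nat => pvEv (s0 :: tl) l (k : Int))
          = (fun k : Nat => if (fun k : Nat => pvEb (s0 :: tl) l (k : Int)) k then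
              some ((fun k : Nat => ((k : Int), (k : Int) + ((s0 :: tl).length : Int))) k)
            else if (fun k : Nat => pvDb (s0 :: tl) l (k : Int)) k then
              some ((fun k : Nat => ((k : Int), (k : Int) + ((s0 :: tl).length : Int) - 1)) k)
            else none) from by funext k; rfl,
        pvCombine (List.range l.length) _ _ _ _ List.pairwise_lt_range
          (fun k => pvNotBoth s0 tl l k),
        hfq]
      rw [pii_locator_alt, if_neg hne]
      dsimp only
      rw [if_neg hg]
      rw [hi1]
      cases hfp : (List.range l.length).find? (fun k : Nat => pvEb (s0 :: tl) l (k : Int)) with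
      | none => rfl
      | some a => rfl

-- ===== VERDICT (by name: the statement is the Claim_ definition above) =====
theorem pii_locator_spec : Claim_equal_pii_locator := by
  intro sl l _ hpre
  exact pvMain sl l hpre
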